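-- pv_equiv track=rewrite | github.com/Kuhron/programming | WilsonOrdering.py | get_coprime_tuples
-- ===== SOURCE A (Python) =====
-- import math
--
-- def get_coprime_tuples(max_denom):
--     res = []
--     for denom in range(1, max_denom+1):
--         if denom == 1:
--             res.append((0,1))
--             res.append((1,1))
--         else:
--             for numer in range(1, denom):  # don't want value equaling either 0 or 1 with denom other than 1
--                 if math.gcd(numer, denom) == 1:
--                     res.append((numer, denom))
--     return res
-- ===== SOURCE B (Python) =====
-- def get_coprime_tuples(max_denom):
--     # sieve-style: per denominator, strike out multiples of its divisors instead of per-pair gcd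
--     res = [(0, 1), (1, 1)] if max_denom >= 1 else []
--     for denom in range(2, max_denom + 1):
--         candidates = list(range(1, denom))
--         for k in range(2, denom + 1):
--             if denom % k == 0:
--                 candidates = [n for n in candidates if n % k != 0]
--         for n in candidates:
--             res.append((n, denom))
--     return res
-- ===== Notes on version B (the rewrite author's own statement) =====
-- stated objective: alternative
-- what changed: B replaces the per-pair math.gcd test by a per-denominator sieve: it starts from all candidate numerators 1..denom-1 and strikes out the multiples of each divisor of denom, so no gcd is ever computed.
import Mathlib
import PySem

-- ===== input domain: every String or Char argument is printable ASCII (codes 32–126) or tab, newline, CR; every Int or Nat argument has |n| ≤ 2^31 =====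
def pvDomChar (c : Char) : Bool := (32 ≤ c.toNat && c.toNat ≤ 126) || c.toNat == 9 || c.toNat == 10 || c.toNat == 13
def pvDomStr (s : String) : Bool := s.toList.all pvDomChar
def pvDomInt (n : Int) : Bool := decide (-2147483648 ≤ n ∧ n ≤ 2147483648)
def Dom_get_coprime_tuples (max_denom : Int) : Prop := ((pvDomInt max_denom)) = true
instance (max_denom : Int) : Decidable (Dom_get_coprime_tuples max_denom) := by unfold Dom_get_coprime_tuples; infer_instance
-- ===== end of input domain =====

-- B replaces A's per-pair gcd test by a per-denominator sieve that strikes out multiples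
-- of each divisor of the denominator (objective: alternative algorithm, same output).

-- ===== PORT A =====
def get_coprime_tuples (max_denom : Int) : List (Int × Int) :=
  (PySem.List.pyRange 1 (max_denom + 1) 1).foldl (fun res denom =>
    if denom = 1 then (res ++ [((0 : Int), (1 : Int))]) ++ [(1, 1)]
    else (PySem.List.pyRange 1 denom 1).foldl (fun res numer =>
      if Int.gcd numer denom = 1 then res ++ [(numer, denom)] else res) res) []

-- ===== PORT B =====
def get_coprime_tuples_alt (max_denom : Int) : List (Int × Int) :=
  let res0 : List (Int × Int) := if max_denom ≥ 1 then [(0, 1), (1, 1)] else []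
  (PySem.List.pyRange 2 (max_denom + 1) 1).foldl (fun res denom =>
    let candidates :=
      (PySem.List.pyRange 2 (denom + 1) 1).foldl (fun cand k =>
        if PySem.Int.mod denom k = 0 then cand.filter (fun n => PySem.Int.mod n k ≠ 0)
        else cand)
        (PySem.List.pyRange 1 denom 1)
    candidates.foldl (fun res n => res ++ [(n, denom)]) res) res0

-- ===== PRECONDITION & SPEC =====
def Spec_get_coprime_tuples (max_denom : Int) (out : List (Int × Int)) : Prop := out = get_coprime_tuples_alt max_denom
instance (max_denom : Int) (out : List (Int × Int)) : Decidable (Spec_get_coprime_tuples max_denom out) := by unfold Spec_get_coprime_tuples; infer_instance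

-- ===== CLAIM (what is proved, stated in full; the proofs are below) =====
def Claim_equal_get_coprime_tuples : Prop := ∀ (max_denom : Int), Dom_get_coprime_tuples max_denom → Spec_get_coprime_tuples max_denom (get_coprime_tuples max_denom)

-- ===== LEMMAS AND PROOFS =====

-- folding conditional filters = one filter by the conjunction of the per-step tests
theorem sieve_foldl_eq_filter (denom : Int) (ks : List Int) (l0 : List Int) :
    ks.foldl (fun cand k =>
        if PySem.Int.mod denom k = 0 then cand.filter (fun n => PySem.Int.mod n k ≠ 0)
        else cand) l0
      = l0.filter (fun n => ks.all (fun k =>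
          !(decide (PySem.Int.mod denom k = 0)) || decide (PySem.Int.mod n k ≠ 0))) := by
  induction ks generalizing l0 with
  | nil => simp
  | cons k ks ih =>
      simp only [List.foldl_cons, List.all_cons]
      by_cases h : PySem.Int.mod denom k = 0
      · rw [if_pos h, ih, List.filter_filter]
        apply List.filter_congr
        intro a _
        simp [h, Bool.and_comm]
      · rw [if_neg h, ih]
        simp [h]

-- gcd(n, denom) = 1 ↔ no divisor k of denom with 2 ≤ k ≤ denom divides n (for 1 ≤ n < denom)
theorem gcd_eq_all_sieve (n denom : Int) (hn : 1 ≤ n) (hnd : n < denom) :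
    ((PySem.List.pyRange 2 (denom + 1) 1).all (fun k =>
        !(decide (PySem.Int.mod denom k = 0)) || decide (PySem.Int.mod n k ≠ 0)))
      = decide (Int.gcd n denom = 1) := by
  have key : (∀ k : Int, 2 ≤ k → k < denom + 1 → k ∣ denom → ¬ k ∣ n) ↔ Int.gcd n denom = 1 := by
    constructor
    · intro h
      by_contra hne
      have hg0 : Int.gcd n denom ≠ 0 := by
        intro h0
        have := Int.gcd_eq_zero_iff.mp h0
        omega
      have hgn : (Int.gcd n denom : Int) ∣ n := Int.gcd_dvd_left n denom
      have hgd : (Int.gcd n denom : Int) ∣ denom := Int.gcd_dvd_right n denom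
      have hle : (Int.gcd n denom : Int) ≤ n := Int.le_of_dvd (by omega) hgn
      have hg2 : (2 : Int) ≤ (Int.gcd n denom : Int) := by
        have h1 : Int.gcd n denom ≠ 1 := hne
        exact_mod_cast (by omega : (2 : Nat) ≤ Int.gcd n denom)
      exact h _ hg2 (by omega) hgd hgn
    · intro hg k hk2 _ hkd hkn
      have hcop : IsCoprime n denom := Int.isCoprime_iff_gcd_eq_one.mpr hg
      have hunit : IsUnit k := hcop.isUnit_of_dvd' hkn hkd
      rcases Int.isUnit_iff.mp hunit with h | h <;> omega
  rw [Bool.eq_iff_iff, decide_eq_true_eq, List.all_eq_true]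
  constructor
  · intro hb
    apply key.mp
    intro k hk2 hklt hkd hkn
    have := hb k (PySem.List.mem_pyRange_one.mpr ⟨hk2, hklt⟩)
    simp only [Bool.or_eq_true, Bool.not_eq_true', decide_eq_false_iff_not,
      decide_eq_true_eq] at this
    rcases this with h | h
    · exact h ((PySem.Int.mod_eq_zero_iff_dvd denom k).mpr hkd)
    · exact h ((PySem.Int.mod_eq_zero_iff_dvd n k).mpr hkn)
  · intro hg k hkmem
    rw [PySem.List.mem_pyRange_one] at hkmem
    simp only [Bool.or_eq_true, Bool.not_eq_true', decide_eq_false_iff_not, decide_eq_true_eq]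
    rw [or_iff_not_imp_left, not_not]
    intro hkd hkn
    exact key.mpr hg k hkmem.1 hkmem.2
      ((PySem.Int.mod_eq_zero_iff_dvd denom k).mp hkd)
      ((PySem.Int.mod_eq_zero_iff_dvd n k).mp hkn)

-- ===== VERDICT (by name: the statement is the Claim_ definition above) =====
theorem get_coprime_tuples_spec : Claim_equal_get_coprime_tuples := by
  intro max_denom _
  unfold Spec_get_coprime_tuples get_coprime_tuples get_coprime_tuples_alt
  by_cases h : max_denom ≥ 1
  · rw [if_pos h, PySem.List.pyRange_one_cons (by omega : (1 : Int) < max_denom + 1)]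
    simp only [List.foldl_cons, List.nil_append, List.cons_append, reduceIte]
    apply PySem.List.foldl_congr_mem
    intro res denom hmem
    rw [PySem.List.mem_pyRange_one] at hmem
    rw [if_neg (by omega : ¬ denom = 1)]
    rw [PySem.List.foldl_append_ite (fun numer => Int.gcd numer denom = 1)
      (fun numer => (numer, denom))]
    rw [sieve_foldl_eq_filter,
      PySem.List.foldl_append_singleton_eq_map (fun n => (n, denom))]
    congr 1
    congr 1
    apply List.filter_congr
    intro n hn
    rw [PySem.List.mem_pyRange_one] at hn
    exact (gcd_eq_all_sieve n denom hn.1 hn.2).symm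
  · rw [if_neg h, PySem.List.pyRange_one_eq_nil (by omega : max_denom + 1 ≤ 1),
      PySem.List.pyRange_one_eq_nil (by omega : max_denom + 1 ≤ 2)]
    rfl
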